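-- pv_equiv track=rewrite | github.com/VipinArl/FileFin | FileFin.py | get_language_based_result
-- ===== SOURCE A (Python) =====
-- def get_language_based_result(results):
--     language_priority = ['ml', 'ta', 'te', 'hi', 'en']
--     result_languages = [r.get('original_language', '') for r in results]
--     for lang in language_priority:
--         indices = [ri for ri, rlang in enumerate(result_languages) if rlang == lang]
--         if len(indices) > 0:
--             return [results[i] for i in indices]
--
--     return results
-- ===== SOURCE B (Python) =====
-- def get_language_based_result(results):
--     groups = {}
--     for r in results:
--         lang = r.get('original_language', '')
--         groups[lang] = groups.get(lang, []) + [r]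
--     for lang in ['ml', 'ta', 'te', 'hi', 'en']:
--         group = groups.get(lang, [])
--         if group:
--             return group
--     return results
-- ===== Notes on version B (the rewrite author's own statement) =====
-- stated objective: simpler
-- what changed: B groups the results by language in a single pass into a dict and then just looks up the five priority languages, instead of re-scanning the whole list (enumerate + filter + index-rebuild) once per priority language.
import Mathlib
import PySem

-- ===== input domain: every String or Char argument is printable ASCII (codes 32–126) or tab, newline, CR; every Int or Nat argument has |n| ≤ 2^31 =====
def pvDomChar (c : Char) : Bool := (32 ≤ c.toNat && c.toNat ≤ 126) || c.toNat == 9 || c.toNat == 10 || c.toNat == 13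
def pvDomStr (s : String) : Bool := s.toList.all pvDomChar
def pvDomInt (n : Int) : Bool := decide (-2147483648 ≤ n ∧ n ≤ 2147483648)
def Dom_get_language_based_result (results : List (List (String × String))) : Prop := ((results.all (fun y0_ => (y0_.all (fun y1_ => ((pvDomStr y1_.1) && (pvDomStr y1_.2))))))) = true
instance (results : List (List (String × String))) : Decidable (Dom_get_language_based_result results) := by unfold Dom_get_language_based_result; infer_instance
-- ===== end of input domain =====

-- B groups by language in one pass; A re-scans the result list once per priority language. Same value everywhere.

-- shared helper: r.get('original_language', '')  (first-match lookup in the association list)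
def pvKey (r : List (String × String)) : String :=
  (PySem.Dict.mk r).getD "original_language" ""

-- ===== PORT A =====
-- the 'for lang in language_priority' loop with its early return
def pvALoop (results : List (List (String × String))) (langs : List String) :
    List String → List (List (String × String))
  | [] => results
  | lang :: rest =>
    let indices := ((PySem.List.enumerate langs 0).filter (fun p => p.2 == lang)).map (·.1)
    if 0 < indices.length then
      -- indices are always in range, so the getD default is never used
      indices.map (fun i => (PySem.List.pyGet? results i).getD [])
    else pvALoop results langs rest

def get_language_based_result (results : List (List (String × String))) : List (List (String × String)) :=
  pvALoop results (results.map pvKey) ["ml", "ta", "te", "hi", "en"]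

-- ===== PORT B =====
def pvBLoop (results : List (List (String × String)))
    (groups : PySem.Dict String (List (List (String × String)))) :
    List String → List (List (String × String))
  | [] => results
  | lang :: rest =>
    let group := groups.getD lang []
    if group.isEmpty then pvBLoop results groups rest else group

def get_language_based_result_alt (results : List (List (String × String))) : List (List (String × String)) :=
  let groups := results.foldl (fun d r => d.modify (pvKey r) [] (· ++ [r])) PySem.Dict.empty
  pvBLoop results groups ["ml", "ta", "te", "hi", "en"]

-- ===== PRECONDITION & SPEC =====
def Spec_get_language_based_result (results : List (List (String × String))) (out : List (List (String × String))) : Prop := out = get_language_based_result_alt results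
instance (results : List (List (String × String))) (out : List (List (String × String))) : Decidable (Spec_get_language_based_result results out) := by unfold Spec_get_language_based_result; infer_instance

-- ===== CLAIM (what is proved, stated in full; the proofs are below) =====
def Claim_equal_get_language_based_result : Prop := ∀ (results : List (List (String × String))), Dom_get_language_based_result results → Spec_get_language_based_result results (get_language_based_result results)

-- ===== LEMMAS AND PROOFS =====

-- A's index-rebuild equals a direct filter of the suffix rs sitting after prefix pre
theorem pvA_filter (lang : String) :
    ∀ (rs pre : List (List (String × String))),
      ((PySem.List.enumerate (rs.map pvKey) (pre.length : Int)).filter (fun p => p.2 == lang)).map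
          (fun p => (PySem.List.pyGet? (pre ++ rs) p.1).getD [])
        = rs.filter (fun r => pvKey r == lang) := by
  intro rs
  induction rs with
  | nil => intro pre; simp [PySem.List.enumerate_nil]
  | cons r rs ih =>
    intro pre
    rw [List.map_cons, PySem.List.enumerate_cons]
    by_cases h : pvKey r == lang
    · simp only [List.filter_cons, h]
      have h2 := ih (pre ++ [r])
      simp only [List.length_append, List.length_singleton] at h2
      push_cast at h2
      rw [List.append_assoc] at h2
      simp only [List.singleton_append] at h2
      simp [← h2]
    · simp only [List.filter_cons, h]
      have h2 := ih (pre ++ [r])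
      simp only [List.length_append, List.length_singleton] at h2
      push_cast at h2
      rw [List.append_assoc] at h2
      simp only [List.singleton_append] at h2
      simp only [Bool.false_eq_true, if_false, ← h2]

-- B's grouping fold: every lookup is the filter of the results by that language
theorem pvB_getD (lang : String) :
    ∀ (rs : List (List (String × String))) (d : PySem.Dict String (List (List (String × String)))),
      (rs.foldl (fun d r => d.modify (pvKey r) [] (· ++ [r])) d).getD lang []
        = d.getD lang [] ++ rs.filter (fun r => pvKey r == lang) := by
  intro rs
  induction rs with
  | nil => intro d; simp
  | cons r rs ih =>
    intro d
    rw [List.foldl_cons, ih, List.filter_cons]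
    by_cases h : pvKey r = lang
    · simp [h]
    · have h' : (pvKey r == lang) = false := by simp [h]
      have h'' : ¬ lang = pvKey r := fun hc => h hc.symm
      simp [PySem.Dict.getD_modify, h'', h']

theorem pvLoop_eq (results : List (List (String × String))) :
    ∀ prio,
      pvALoop results (results.map pvKey) prio
        = pvBLoop results (results.foldl (fun d r => d.modify (pvKey r) [] (· ++ [r])) PySem.Dict.empty) prio := by
  intro prio
  induction prio with
  | nil => rfl
  | cons lang rest ih =>
    rw [pvALoop, pvBLoop]
    have hA := pvA_filter lang results []
    simp only [List.length_nil, List.nil_append, Nat.cast_zero] at hA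
    have hB := pvB_getD lang results PySem.Dict.empty
    simp only [PySem.Dict.getD_empty, List.nil_append] at hB
    have hA' := congrArg List.length hA
    rw [List.length_map] at hA'
    simp only [hB, List.map_map, Function.comp_def, List.length_map, hA']
    by_cases hne : results.filter (fun r => pvKey r == lang) = []
    · simp only [hne, List.length_nil, List.isEmpty_nil, lt_self_iff_false, if_false, if_true]
      exact ih
    · have hpos : 0 < (results.filter (fun r => pvKey r == lang)).length :=
        List.length_pos_of_ne_nil hne
      simp only [hpos, if_true, List.isEmpty_iff, hne, if_false]
      exact hA

-- ===== VERDICT (by name: the statement is the Claim_ definition above) =====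
theorem get_language_based_result_spec : Claim_equal_get_language_based_result := by
  intro results _
  unfold Spec_get_language_based_result get_language_based_result get_language_based_result_alt
  exact pvLoop_eq results _
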